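-- pv_equiv track=rewrite | github.com/pyruswitch/python-dailycode-master | lunchschedule.py | menusort
-- ===== SOURCE A (Python) =====
-- def menusort(consultedlist ,sortlist):
--     new=[]
--     for i in sortlist :
--         if i not in consultedlist:
--             new.append(i)
--     for newi in new:
--         sortlist.remove(newi)
--     sorted(sortlist,key=consultedlist.index)
--     for newi in  new:
--         sortlist.append(newi)
--     return sortlist
-- ===== SOURCE B (Python) =====
-- def menusort(consultedlist, sortlist):
--     # Stable in-place sort: members of consultedlist first (original order),
--     # non-members after (original order).
--     sortlist.sort(key=lambda x: x not in consultedlist)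
--     return sortlist
-- ===== Notes on version B (the rewrite author's own statement) =====
-- stated objective: idiomatic
-- what changed: Replaces A's three passes (collect non-members, remove each with list.remove, re-append them) by a single in-place stable sort with the boolean key 'x not in consultedlist', which realises the same stable partition.
import Mathlib
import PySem

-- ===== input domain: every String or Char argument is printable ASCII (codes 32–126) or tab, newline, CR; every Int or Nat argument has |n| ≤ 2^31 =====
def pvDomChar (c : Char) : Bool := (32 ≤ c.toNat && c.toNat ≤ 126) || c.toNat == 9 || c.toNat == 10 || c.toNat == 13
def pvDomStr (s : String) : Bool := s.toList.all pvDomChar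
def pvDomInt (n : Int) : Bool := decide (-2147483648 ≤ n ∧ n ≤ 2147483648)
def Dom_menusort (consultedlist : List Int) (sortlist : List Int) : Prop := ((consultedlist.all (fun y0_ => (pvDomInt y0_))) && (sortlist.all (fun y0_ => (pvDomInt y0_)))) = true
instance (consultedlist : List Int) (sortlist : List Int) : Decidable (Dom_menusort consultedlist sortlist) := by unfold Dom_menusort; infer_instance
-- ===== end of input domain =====

-- B replaces A's collect/remove/re-append passes by one in-place stable sort on the
-- boolean key 'x not in consultedlist' (idiomatic; same stable partition).
-- Both A and B mutate sortlist in place in Python; the equivalence proved here is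
-- about the RETURN value (in both programs the returned list is the mutated argument).

-- ===== PORT A =====
def menusort (consultedlist : List Int) (sortlist : List Int) : List Int :=
  -- new = []; for i in sortlist: if i not in consultedlist: new.append(i)
  let new := sortlist.foldl (fun acc i => if i ∈ consultedlist then acc else acc ++ [i]) []
  -- for newi in new: sortlist.remove(newi)
  -- remove? is none only when newi is absent, which never happens here (newi was
  -- collected from sortlist), so the .getD default branch is unreachable.
  let sortlist1 := new.foldl (fun st newi => (PySem.List.remove? st newi).getD st) sortlist
  -- 'sorted(sortlist, key=consultedlist.index)' builds a new list Python discards: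
  -- it has no effect on the returned value, so it contributes nothing here.
  -- for newi in new: sortlist.append(newi)
  new.foldl (fun st newi => st ++ [newi]) sortlist1

-- ===== PORT B =====
def menusort_alt (consultedlist : List Int) (sortlist : List Int) : List Int :=
  -- sortlist.sort(key=lambda x: x not in consultedlist); return sortlist
  PySem.List.sorted sortlist (fun x => decide (x ∉ consultedlist)) false

-- ===== PRECONDITION & SPEC =====
def Spec_menusort (consultedlist : List Int) (sortlist : List Int) (out : List Int) : Prop := out = menusort_alt consultedlist sortlist
instance (consultedlist : List Int) (sortlist : List Int) (out : List Int) : Decidable (Spec_menusort consultedlist sortlist out) := by unfold Spec_menusort; infer_instance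

-- ===== CLAIM (what is proved, stated in full; the proofs are below) =====
def Claim_equal_menusort : Prop := ∀ (consultedlist : List Int) (sortlist : List Int), Dom_menusort consultedlist sortlist → Spec_menusort consultedlist sortlist (menusort consultedlist sortlist)

-- ===== LEMMAS AND PROOFS =====

lemma insertBy_cons {α : Type} (bf : α → α → Bool) (x y : α) (ys : List α) :
    PySem.List.insertBy bf x (y :: ys)
      = if bf x y = true then x :: y :: ys else y :: PySem.List.insertBy bf x ys := rfl

-- Inserting a member (key false) into (members ++ nonmembers) puts it after the members.
lemma insertBy_key_false (c : List Int) (x : Int) (hx : x ∈ c) :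
    ∀ (A B : List Int), (∀ a ∈ A, a ∈ c) → (∀ b ∈ B, b ∉ c) →
      PySem.List.insertBy (fun a b => decide ((decide (a ∉ c)) < (decide (b ∉ c)))) x (A ++ B)
        = A ++ x :: B := by
  intro A
  induction A with
  | nil =>
    intro B _ hB
    cases B with
    | nil => simp [PySem.List.insertBy]
    | cons b bs =>
      have hb : b ∉ c := hB b (by simp)
      have hcond : decide ((decide (x ∉ c)) < (decide (b ∉ c))) = true := by
        rw [show decide (x ∉ c) = false from by simp [hx],
            show decide (b ∉ c) = true from by simp [hb]]
        decide
      rw [List.nil_append, insertBy_cons, hcond, if_pos rfl, List.nil_append]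
  | cons a as ih =>
    intro B hA hB
    have ha : a ∈ c := hA a (by simp)
    have hcond : decide ((decide (x ∉ c)) < (decide (a ∉ c))) = false := by
      rw [show decide (x ∉ c) = false from by simp [hx],
          show decide (a ∉ c) = false from by simp [ha]]
      decide
    rw [List.cons_append, insertBy_cons, hcond]
    simp only [Bool.false_eq_true, if_false, List.cons_append]
    rw [ih B (fun y hy => hA y (List.mem_cons_of_mem _ hy)) hB]

-- Inserting a non-member (key true) appends at the end.
lemma insertBy_key_true (c : List Int) (x : Int) (hx : x ∉ c) :
    ∀ (l : List Int),
      PySem.List.insertBy (fun a b => decide ((decide (a ∉ c)) < (decide (b ∉ c)))) x l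
        = l ++ [x] := by
  intro l
  induction l with
  | nil => simp [PySem.List.insertBy]
  | cons y ys ih =>
    have hcond : decide ((decide (x ∉ c)) < (decide (y ∉ c))) = false := by
      rw [show decide (x ∉ c) = true from by simp [hx]]
      cases h : decide (y ∉ c) <;> decide
    rw [insertBy_cons, hcond]
    simp only [Bool.false_eq_true, if_false, List.cons_append]
    rw [ih]

-- The insertion-sort fold with the boolean key realises the stable partition.
lemma foldl_insertBy_partition (c : List Int) :
    ∀ (s A B : List Int), (∀ a ∈ A, a ∈ c) → (∀ b ∈ B, b ∉ c) →
      s.foldl (fun acc x =>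
          PySem.List.insertBy (fun a b => decide ((decide (a ∉ c)) < (decide (b ∉ c)))) x acc)
        (A ++ B)
        = (A ++ s.filter (fun x => decide (x ∈ c))) ++ (B ++ s.filter (fun x => decide (x ∉ c))) := by
  intro s
  induction s with
  | nil => intro A B _ _; simp
  | cons x t ih =>
    intro A B hA hB
    by_cases hx : x ∈ c
    · rw [List.foldl_cons, insertBy_key_false c x hx A B hA hB]
      have : A ++ x :: B = (A ++ [x]) ++ B := by simp
      rw [this, ih (A ++ [x]) B
        (by intro a ha; rcases List.mem_append.1 ha with h | h
            · exact hA a h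
            · simp at h; simpa [h] using hx) hB]
      simp [hx]
    · rw [List.foldl_cons, insertBy_key_true c x hx (A ++ B)]
      have : (A ++ B) ++ [x] = A ++ (B ++ [x]) := by simp
      rw [this, ih A (B ++ [x]) hA
        (by intro b hb; rcases List.mem_append.1 hb with h | h
            · exact hB b h
            · simp at h; simpa [h] using hx)]
      simp [hx]

lemma alt_eq_partition (c s : List Int) :
    menusort_alt c s
      = s.filter (fun x => decide (x ∈ c)) ++ s.filter (fun x => decide (x ∉ c)) := by
  have h := foldl_insertBy_partition c s [] [] (by simp) (by simp)
  simpa [menusort_alt, PySem.List.sorted] using h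

-- A's first loop collects exactly the non-members, in order.
lemma collect_eq_filter (c s : List Int) :
    s.foldl (fun acc i => if i ∈ c then acc else acc ++ [i]) []
      = s.filter (fun x => decide (x ∉ c)) := by
  have hfn : (fun (acc : List Int) i => if i ∈ c then acc else acc ++ [i])
      = (fun acc i => if (fun x => decide (x ∉ c)) i = true then acc ++ [(fun x : Int => x) i] else acc) := by
    funext acc i; by_cases h : i ∈ c <;> simp [h]
  rw [hfn, PySem.List.foldl_append_if (fun x => decide (x ∉ c)) (fun x : Int => x) s []]
  simp

-- Removing elements all different from the head leaves the head in place.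
lemma remove_fold_cons (x : Int) :
    ∀ (l t : List Int), (∀ y ∈ l, y ≠ x) →
      l.foldl (fun st y => (PySem.List.remove? st y).getD st) (x :: t)
        = x :: l.foldl (fun st y => (PySem.List.remove? st y).getD st) t := by
  intro l
  induction l with
  | nil => intro t _; rfl
  | cons y l' ih =>
    intro t hl
    have hyx : y ≠ x := hl y (by simp)
    have hidx : List.idxOf? y (x :: t) = (List.idxOf? y t).map (· + 1) := by
      simp [List.idxOf?_cons, beq_iff_eq, Ne.symm hyx]
    have hstep : ((PySem.List.remove? (x :: t) y).getD (x :: t))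
        = x :: ((PySem.List.remove? t y).getD t) := by
      simp only [PySem.List.remove?, hidx]
      cases h : List.idxOf? y t with
      | none => simp
      | some k => simp [List.eraseIdx]
    rw [List.foldl_cons, hstep, List.foldl_cons,
      ih ((PySem.List.remove? t y).getD t) (fun z hz => hl z (List.mem_cons_of_mem _ hz))]

-- A's removal loop leaves exactly the members, in order.
lemma remove_fold_filter (c : List Int) :
    ∀ (s : List Int),
      (s.filter (fun x => decide (x ∉ c))).foldl (fun st y => (PySem.List.remove? st y).getD st) s
        = s.filter (fun x => decide (x ∈ c)) := by
  intro s
  induction s with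
  | nil => rfl
  | cons x t ih =>
    by_cases hx : x ∈ c
    · have hf : (x :: t).filter (fun x => decide (x ∉ c)) = t.filter (fun x => decide (x ∉ c)) := by
        simp [hx]
      rw [hf, remove_fold_cons x _ t
        (by intro y hy; have := List.of_mem_filter hy; simp at this
            intro hcon; subst hcon; exact this hx), ih]
      simp [hx]
    · have hf : (x :: t).filter (fun x => decide (x ∉ c)) = x :: t.filter (fun x => decide (x ∉ c)) := by
        simp [hx]
      have hstep : ((PySem.List.remove? (x :: t) x).getD (x :: t)) = t := by
        simp [PySem.List.remove?, List.idxOf?_cons, List.eraseIdx]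
      rw [hf, List.foldl_cons, hstep, ih]
      simp [hx]

-- ===== VERDICT (by name: the statement is the Claim_ definition above) =====
theorem menusort_spec : Claim_equal_menusort := by
  intro c s _
  show menusort c s = menusort_alt c s
  rw [menusort, alt_eq_partition]
  simp only [collect_eq_filter, remove_fold_filter, PySem.List.foldl_append_singleton]
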